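-- pv_equiv track=rewrite | github.com/Gangbuster/LC101-Sandbox | chapter10_assignment.py | get_country_codes
-- ===== SOURCE A (Python) =====
-- def get_country_codes(prices):
--     code_mod = list(prices)
--     bad_code = ['$', '0', '1', '2', '3', '4', '5', '6', '7', '8', '9']
--     new_code = []
--     for i in code_mod:
--         if i not in bad_code:
--             new_code.append(i)
--     return "".join(new_code)
-- ===== SOURCE B (Python) =====
-- def get_country_codes(prices):
--     for ch in '$0123456789':
--         prices = prices.replace(ch, '')
--     return prices
-- ===== Notes on version B (the rewrite author's own statement) =====
-- stated objective: faster
-- what changed: Instead of one Python-level pass over the input characters with a bad-character membership test, B loops over the 11 bad characters and deletes each with a whole-string str.replace pass (staged passes driven by the bad set, not the input), each pass running in C.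
import Mathlib
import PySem

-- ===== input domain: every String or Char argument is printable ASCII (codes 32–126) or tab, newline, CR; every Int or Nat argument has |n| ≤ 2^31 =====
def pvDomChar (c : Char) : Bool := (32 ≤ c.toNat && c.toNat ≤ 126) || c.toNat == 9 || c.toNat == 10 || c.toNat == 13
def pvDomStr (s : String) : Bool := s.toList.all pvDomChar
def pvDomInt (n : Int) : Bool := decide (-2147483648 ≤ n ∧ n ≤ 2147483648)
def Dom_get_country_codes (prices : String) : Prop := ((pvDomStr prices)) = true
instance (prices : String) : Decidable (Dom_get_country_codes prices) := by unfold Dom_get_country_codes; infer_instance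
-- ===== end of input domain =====

-- B replaces A's single membership-filter pass over the input by one replace pass per bad character (alternative decomposition).

-- ===== PORT A =====
def get_country_codes (prices : String) : String :=
  let code_mod := prices.toList
  let bad_code : List Char := ['$', '0', '1', '2', '3', '4', '5', '6', '7', '8', '9']
  let new_code := code_mod.foldl (fun acc i => if i ∈ bad_code then acc else acc ++ [i]) []
  String.mk new_code

-- ===== PORT B =====
-- for ch in '$0123456789': prices = prices.replace(ch, '')
-- s.replace(ch, '') for a single character ch and the empty replacement deletes every
-- occurrence of ch: ported exactly as filter (· ≠ ch) on the code points.
def get_country_codes_alt (prices : String) : String :=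
  String.mk (("$0123456789".toList).foldl (fun s ch => s.filter (fun c => c ≠ ch)) prices.toList)

-- ===== PRECONDITION & SPEC =====
def Spec_get_country_codes (prices : String) (out : String) : Prop := out = get_country_codes_alt prices
instance (prices : String) (out : String) : Decidable (Spec_get_country_codes prices out) := by unfold Spec_get_country_codes; infer_instance

-- ===== CLAIM =====
def Claim_equal_get_country_codes : Prop := ∀ (prices : String), Dom_get_country_codes prices → Spec_get_country_codes prices (get_country_codes prices)

-- ===== LEMMAS AND PROOFS =====
-- A's loop is the filter "not in bad_code".
theorem pvA_eq_filter (l : List Char) :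
    l.foldl (fun acc i => if i ∈ (['$', '0', '1', '2', '3', '4', '5', '6', '7', '8', '9'] : List Char) then acc else acc ++ [i]) [] =
    l.filter (fun c => ¬ c ∈ (['$', '0', '1', '2', '3', '4', '5', '6', '7', '8', '9'] : List Char)) := by
  have h := PySem.List.foldl_append_ite_eq_filter
    (p := fun i => ¬ i ∈ (['$', '0', '1', '2', '3', '4', '5', '6', '7', '8', '9'] : List Char))
    (l := l) (acc := [])
  simp only [List.nil_append] at h
  rw [show (fun acc i => if i ∈ (['$', '0', '1', '2', '3', '4', '5', '6', '7', '8', '9'] : List Char) then acc else acc ++ [i]) =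
        (fun acc i => if ¬ i ∈ (['$', '0', '1', '2', '3', '4', '5', '6', '7', '8', '9'] : List Char) then acc ++ [i] else acc) by
      funext acc i; by_cases hi : i ∈ (['$', '0', '1', '2', '3', '4', '5', '6', '7', '8', '9'] : List Char) <;> simp [hi]]
  exact h

-- B's staged per-character deletions collapse to one filter over the bad list.
theorem pvB_stage (bad : List Char) (l : List Char) :
    bad.foldl (fun s ch => s.filter (fun c => c ≠ ch)) l =
    l.filter (fun c => ¬ c ∈ bad) := by
  induction bad generalizing l with
  | nil => simp
  | cons ch rest ih =>
      simp only [List.foldl_cons, ih, List.filter_filter]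
      apply List.filter_congr
      intro c _
      by_cases h1 : c = ch <;> simp [h1]

-- ===== VERDICT =====
theorem get_country_codes_spec : Claim_equal_get_country_codes := by
  intro prices _
  unfold Spec_get_country_codes get_country_codes get_country_codes_alt
  rw [show "$0123456789".toList = (['$', '0', '1', '2', '3', '4', '5', '6', '7', '8', '9'] : List Char) from rfl]
  simp only [pvA_eq_filter, pvB_stage]
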